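-- pv_equiv track=rewrite | github.com/pypi-data/pypi-mirror-403 | packages/highlighter-sdk/highlighter_sdk-2.6.37.tar.gz/highlighter_sdk-2.6.37/highlighter/datasets/formats/coco/writer.py | _tabulate_list_diff
-- ===== SOURCE A (Python) =====
-- def _tabulate_list_diff(a, b, a_title, b_title):
--     """Create a readable diff for 2 lists
--
--     abc | abc
--     xyz | ---
--     --- | foo
--     bar | bar
--
--     """
--     ab = sorted(set(a + b))
--     left_cols = []
--     right_cols = []
--     for ele in ab:
--         left_cols.append(ele if ele in a else "-" * len(ele))
--         right_cols.append(ele if ele in b else "-" * len(ele))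
--
--     table = [f"{a_title:<40} | {b_title}"]
--     table.extend([f"{l:40} | {r}" for l, r in zip(left_cols, right_cols)])
--     return "\n".join(table)
-- ===== SOURCE B (Python) =====
-- def _tabulate_list_diff(a, b, a_title, b_title):
--     """Create a readable diff for 2 lists (two-pointer merge of the two sorted sets)."""
--     sa = sorted(set(a))
--     sb = sorted(set(b))
--     rows = []
--     i = j = 0
--     while i < len(sa) and j < len(sb):
--         x, y = sa[i], sb[j]
--         if x < y:
--             rows.append((x, "-" * len(x)))
--             i += 1
--         elif y < x:
--             rows.append(("-" * len(y), y))
--             j += 1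
--         else:
--             rows.append((x, y))
--             i += 1
--             j += 1
--     while i < len(sa):
--         x = sa[i]
--         rows.append((x, "-" * len(x)))
--         i += 1
--     while j < len(sb):
--         y = sb[j]
--         rows.append(("-" * len(y), y))
--         j += 1
--     lines = [f"{a_title:<40} | {b_title}"]
--     lines.extend(f"{l:40} | {r}" for l, r in rows)
--     return "\n".join(lines)
-- ===== Notes on version B (the rewrite author's own statement) =====
-- stated objective: faster
-- what changed: Instead of sorting the deduplicated union and scanning both original lists for membership of every element, B sorts each side's set separately and emits the rows by a single two-pointer merge, so the per-element linear 'in a'/'in b' scans disappear.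
import Mathlib
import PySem

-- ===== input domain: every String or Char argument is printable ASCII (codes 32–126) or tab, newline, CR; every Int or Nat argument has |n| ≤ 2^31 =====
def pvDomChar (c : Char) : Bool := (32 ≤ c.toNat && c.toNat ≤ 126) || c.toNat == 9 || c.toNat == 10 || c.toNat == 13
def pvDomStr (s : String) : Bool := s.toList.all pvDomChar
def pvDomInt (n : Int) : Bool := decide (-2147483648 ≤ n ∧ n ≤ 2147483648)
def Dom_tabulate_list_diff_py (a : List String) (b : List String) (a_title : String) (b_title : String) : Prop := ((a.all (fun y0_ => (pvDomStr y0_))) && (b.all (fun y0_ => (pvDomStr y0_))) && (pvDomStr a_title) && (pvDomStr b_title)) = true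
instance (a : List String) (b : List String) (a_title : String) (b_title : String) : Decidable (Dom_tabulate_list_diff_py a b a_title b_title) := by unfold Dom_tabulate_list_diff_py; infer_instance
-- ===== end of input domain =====

-- B replaces A's sorted-union-plus-membership-scans with a two-pointer merge of the two sorted sets (faster: no per-row linear 'in' scans).


-- ===== PORT A =====
-- "-" * len(ele)
def pvDash (s : String) : String := String.ofList (List.replicate s.toList.length '-')
-- f"{l:40} | {r}" (also f"{l:<40} | {r}"): hand-ported, exact — left-justify l with spaces to
-- width 40 (Nat subtraction clamps to 0 exactly where Python adds no padding), then " | ", then r.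
def pvRow (l r : String) : String :=
  String.ofList (l.toList ++ List.replicate (40 - l.toList.length) ' ' ++ [' ', '|', ' '] ++ r.toList)

def tabulate_list_diff_py (a : List String) (b : List String) (a_title : String) (b_title : String) : String :=
  let ab := PySem.List.sorted (PySem.Set.ofList (a ++ b)) (fun x => x) false
  let left_cols := ab.foldl (fun acc ele => acc ++ [if a.contains ele then ele else pvDash ele]) []
  let right_cols := ab.foldl (fun acc ele => acc ++ [if b.contains ele then ele else pvDash ele]) []
  let table := [pvRow a_title b_title] ++ (left_cols.zip right_cols).map (fun p => pvRow p.1 p.2)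
  PySem.Str.join "\n" table

-- ===== PORT B =====
-- the two-pointer while loop of Source B, as the obvious structural recursion over the two sorted lists
def pvMerge : List String → List String → List (String × String)
  | [], ys => ys.map (fun y => (pvDash y, y))
  | x :: xs, [] => (x, pvDash x) :: pvMerge xs []
  | x :: xs, y :: ys =>
    if x < y then (x, pvDash x) :: pvMerge xs (y :: ys)
    else if y < x then (pvDash y, y) :: pvMerge (x :: xs) ys
    else (x, y) :: pvMerge xs ys
termination_by xs ys => xs.length + ys.length

def tabulate_list_diff_py_alt (a : List String) (b : List String) (a_title : String) (b_title : String) : String :=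
  let sa := PySem.List.sorted (PySem.Set.ofList a) (fun x => x) false
  let sb := PySem.List.sorted (PySem.Set.ofList b) (fun x => x) false
  let rows := pvMerge sa sb
  PySem.Str.join "\n" ([pvRow a_title b_title] ++ rows.map (fun p => pvRow p.1 p.2))

-- ===== PRECONDITION & SPEC =====
def Spec_tabulate_list_diff_py (a : List String) (b : List String) (a_title : String) (b_title : String) (out : String) : Prop := out = tabulate_list_diff_py_alt a b a_title b_title
instance (a : List String) (b : List String) (a_title : String) (b_title : String) (out : String) : Decidable (Spec_tabulate_list_diff_py a b a_title b_title out) := by unfold Spec_tabulate_list_diff_py; infer_instance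

-- ===== CLAIM (what is proved, stated in full; the proofs are below) =====
def Claim_equal_tabulate_list_diff_py : Prop := ∀ (a : List String) (b : List String) (a_title : String) (b_title : String), Dom_tabulate_list_diff_py a b a_title b_title → Spec_tabulate_list_diff_py a b a_title b_title (tabulate_list_diff_py a b a_title b_title)

-- ===== LEMMAS AND PROOFS =====

-- the key sequence the merge walks through (proof helper only)
def pvKeys : List String → List String → List String
  | [], ys => ys
  | x :: xs, [] => x :: pvKeys xs []
  | x :: xs, y :: ys =>
    if x < y then x :: pvKeys xs (y :: ys)
    else if y < x then y :: pvKeys (x :: xs) ys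
    else x :: pvKeys xs ys
termination_by xs ys => xs.length + ys.length

lemma mem_pvKeys (xs ys : List String) (e : String) : e ∈ pvKeys xs ys ↔ e ∈ xs ∨ e ∈ ys := by
  induction xs, ys using pvKeys.induct with
  | case1 ys => simp [pvKeys]
  | case2 x xs ih => simp [pvKeys, ih]
  | case3 x xs y ys h ih => simp [pvKeys, h, ih]; tauto
  | case4 x xs y ys h h' ih => simp [pvKeys, h, h', ih]; tauto
  | case5 x xs y ys h h' ih =>
    have : x = y := le_antisymm (not_lt.mp h') (not_lt.mp h)
    subst this
    simp [pvKeys, ih]; tauto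

lemma pvKeys_pairwise (xs ys : List String) (hx : xs.Pairwise (· < ·)) (hy : ys.Pairwise (· < ·)) :
    (pvKeys xs ys).Pairwise (· < ·) := by
  induction xs, ys using pvKeys.induct with
  | case1 ys => simpa [pvKeys] using hy
  | case2 x xs ih =>
    rw [pvKeys]
    rw [List.pairwise_cons] at hx ⊢
    refine ⟨fun e he => ?_, ih hx.2 hy⟩
    rcases (mem_pvKeys xs [] e).mp he with h | h
    · exact hx.1 e h
    · simp at h
  | case3 x xs y ys h ih =>
    rw [pvKeys, if_pos h]
    rw [List.pairwise_cons] at hx ⊢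
    refine ⟨fun e he => ?_, ih hx.2 hy⟩
    rcases (mem_pvKeys xs (y :: ys) e).mp he with h1 | h1
    · exact hx.1 e h1
    · rcases List.mem_cons.mp h1 with rfl | h2
      · exact h
      · exact lt_trans h ((List.pairwise_cons.mp hy).1 e h2)
  | case4 x xs y ys h h' ih =>
    rw [pvKeys, if_neg h, if_pos h']
    rw [List.pairwise_cons] at hy ⊢
    refine ⟨fun e he => ?_, ih hx hy.2⟩
    rcases (mem_pvKeys (x :: xs) ys e).mp he with h1 | h1
    · rcases List.mem_cons.mp h1 with rfl | h2
      · exact h'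
      · exact lt_trans h' ((List.pairwise_cons.mp hx).1 e h2)
    · exact hy.1 e h1
  | case5 x xs y ys h h' ih =>
    have hxy : x = y := le_antisymm (not_lt.mp h') (not_lt.mp h)
    subst hxy
    rw [pvKeys, if_neg h, if_neg h']
    rw [List.pairwise_cons] at hx hy ⊢
    refine ⟨fun e he => ?_, ih hx.2 hy.2⟩
    rcases (mem_pvKeys xs ys e).mp he with h1 | h1
    · exact hx.1 e h1
    · exact hy.1 e h1

-- the merge emits, for each key, the membership-flagged pair A computes
lemma pvMerge_eq_map (xs ys : List String) (hx : xs.Pairwise (· < ·)) (hy : ys.Pairwise (· < ·)) :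
    pvMerge xs ys = (pvKeys xs ys).map
      (fun e => (if xs.contains e then e else pvDash e, if ys.contains e then e else pvDash e)) := by
  induction xs, ys using pvKeys.induct with
  | case1 ys =>
    rw [pvMerge, pvKeys]
    apply List.map_congr_left
    intro e he
    simp [List.contains_eq_mem, he]
  | case2 x xs ih =>
    rw [pvMerge, pvKeys, List.map_cons]
    rw [ih (List.pairwise_cons.mp hx).2 hy]
    congr 1
    · simp [List.contains_eq_mem]
    apply List.map_congr_left
    intro e he
    have hne : e ≠ x := by
      rcases (mem_pvKeys xs [] e).mp he with h1 | h1
      · exact fun hq => lt_irrefl x (hq ▸ (List.pairwise_cons.mp hx).1 e h1)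
      · simp at h1
    simp [List.contains_eq_mem, hne]
  | case3 x xs y ys h ih =>
    rw [pvMerge, pvKeys, if_pos h, if_pos h, List.map_cons]
    rw [ih (List.pairwise_cons.mp hx).2 hy]
    have hxny : x ∉ (y :: ys) := by
      intro hmem
      rcases List.mem_cons.mp hmem with rfl | h2
      · exact lt_irrefl x h
      · exact lt_irrefl x (lt_trans h ((List.pairwise_cons.mp hy).1 x h2))
    congr 1
    · simp [List.contains_eq_mem, hxny]
    apply List.map_congr_left
    intro e he
    have hlt : x < e := by
      rcases (mem_pvKeys xs (y :: ys) e).mp he with h1 | h1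
      · exact (List.pairwise_cons.mp hx).1 e h1
      · rcases List.mem_cons.mp h1 with rfl | h2
        · exact h
        · exact lt_trans h ((List.pairwise_cons.mp hy).1 e h2)
    have hne : e ≠ x := fun hq => lt_irrefl x (hq ▸ hlt)
    simp [List.contains_eq_mem, hne]
  | case4 x xs y ys h h' ih =>
    rw [pvMerge, pvKeys, if_neg h, if_pos h', if_neg h, if_pos h', List.map_cons]
    rw [ih hx (List.pairwise_cons.mp hy).2]
    have hynx : y ∉ (x :: xs) := by
      intro hmem
      rcases List.mem_cons.mp hmem with rfl | h2
      · exact lt_irrefl y h'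
      · exact lt_irrefl y (lt_trans h' ((List.pairwise_cons.mp hx).1 y h2))
    congr 1
    · simp [List.contains_eq_mem, hynx]
    apply List.map_congr_left
    intro e he
    have hlt : y < e := by
      rcases (mem_pvKeys (x :: xs) ys e).mp he with h1 | h1
      · rcases List.mem_cons.mp h1 with rfl | h2
        · exact h'
        · exact lt_trans h' ((List.pairwise_cons.mp hx).1 e h2)
      · exact (List.pairwise_cons.mp hy).1 e h1
    have hne : e ≠ y := fun hq => lt_irrefl y (hq ▸ hlt)
    simp [List.contains_eq_mem, hne]
  | case5 x xs y ys h h' ih =>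
    have hxy : x = y := le_antisymm (not_lt.mp h') (not_lt.mp h)
    subst hxy
    rw [pvMerge, pvKeys, if_neg h, if_neg h', if_neg h, if_neg h', List.map_cons]
    rw [ih (List.pairwise_cons.mp hx).2 (List.pairwise_cons.mp hy).2]
    congr 1
    · simp [List.contains_eq_mem]
    apply List.map_congr_left
    intro e he
    have hne : e ≠ x := by
      rcases (mem_pvKeys xs ys e).mp he with h1 | h1
      · exact fun hq => lt_irrefl x (hq ▸ (List.pairwise_cons.mp hx).1 e h1)
      · exact fun hq => lt_irrefl x (hq ▸ (List.pairwise_cons.mp hy).1 e h1)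
    simp [List.contains_eq_mem, hne]

-- sorted(set(a+b)) is exactly the merged key sequence
lemma sorted_union_eq_pvKeys (a b : List String) :
    PySem.List.sorted (PySem.Set.ofList (a ++ b)) (fun x => x) false =
      pvKeys (PySem.List.sorted (PySem.Set.ofList a) (fun x => x) false)
             (PySem.List.sorted (PySem.Set.ofList b) (fun x => x) false) := by
  set sa := PySem.List.sorted (PySem.Set.ofList a) (fun x => x) false with hsa
  set sb := PySem.List.sorted (PySem.Set.ofList b) (fun x => x) false with hsb
  have hpa : sa.Pairwise (· < ·) := PySem.List.sorted_ofList_pairwise_lt a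
  have hpb : sb.Pairwise (· < ·) := PySem.List.sorted_ofList_pairwise_lt b
  have hpk : (pvKeys sa sb).Pairwise (· < ·) := pvKeys_pairwise sa sb hpa hpb
  apply PySem.List.sorted_eq_of_perm_of_pairwise_lt
  · refine (List.perm_ext_iff_of_nodup (hpk.imp ne_of_lt) (PySem.Set.nodup_ofList _)).mpr ?_
    intro e
    rw [mem_pvKeys]
    simp [hsa, hsb, PySem.List.mem_sorted, PySem.Set.mem_ofList]
  · exact hpk

lemma mem_sorted_set_iff (a : List String) (e : String) :
    e ∈ PySem.List.sorted (PySem.Set.ofList a) (fun x => x) false ↔ e ∈ a := by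
  rw [PySem.List.mem_sorted, PySem.Set.mem_ofList]

-- ===== VERDICT (by name: the statement is the Claim_ definition above) =====
theorem tabulate_list_diff_py_spec : Claim_equal_tabulate_list_diff_py := by
  intro a b a_title b_title _
  unfold Spec_tabulate_list_diff_py tabulate_list_diff_py tabulate_list_diff_py_alt
  simp only [PySem.List.foldl_append_singleton_eq_map, List.nil_append]
  rw [List.zip_map', List.map_map]
  rw [pvMerge_eq_map _ _ (PySem.List.sorted_ofList_pairwise_lt a) (PySem.List.sorted_ofList_pairwise_lt b)]
  rw [List.map_map, ← sorted_union_eq_pvKeys]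
  congr 2
  apply List.map_congr_left
  intro e he
  have h1 : ((PySem.List.sorted (PySem.Set.ofList a) (fun x => x) false).contains e) = (a.contains e) := by
    simp only [List.contains_eq_mem, mem_sorted_set_iff]
  have h2 : ((PySem.List.sorted (PySem.Set.ofList b) (fun x => x) false).contains e) = (b.contains e) := by
    simp only [List.contains_eq_mem, mem_sorted_set_iff]
  simp only [Function.comp, h1, h2]
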